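-- pv_equiv track=rewrite | github.com/Froopity/bungo-casino | casino/slots.py | calculate_payout
-- ===== SOURCE A (Python) =====
-- def calculate_payout(middle_row):
--   """
--   Calculate payout based on consecutive $ signs in the middle row.
--   Payouts:
--   - 3 consecutive $ = 1
--   - 4 consecutive $ = 2
--   - 5 consecutive $ = 6
--
--   Returns tuple of (payout_amount, consecutive_count)
--   """
--   max_consecutive = 0
--   current_consecutive = 0
--
--   for symbol in middle_row:
--     if symbol == '$':
--       current_consecutive += 1
--       max_consecutive = max(max_consecutive, current_consecutive)
--     else:
--       current_consecutive = 0
--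
--   # Payout table
--   payout_table = {
--     3: 1,
--     4: 2,
--     5: 6
--   }
--
--   payout = payout_table.get(max_consecutive, 0)
--   return payout, max_consecutive
-- ===== SOURCE B (Python) =====
-- def calculate_payout(middle_row):
--   """
--   Calculate payout based on consecutive $ signs in the middle row,
--   computed by divide and conquer: recursively split the row in halves and
--   combine (best_run, prefix_run, suffix_run) triples.
--   Returns tuple of (payout_amount, consecutive_count)
--   """
--   row = list(middle_row)
--
--   def solve(seg):
--     # (best $ run, leading $ run, trailing $ run) of a nonempty segment
--     if len(seg) == 1:
--       d = 1 if seg[0] == '$' else 0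
--       return (d, d, d)
--     mid = len(seg) // 2
--     left, right = seg[:mid], seg[mid:]
--     b1, p1, s1 = solve(left)
--     b2, p2, s2 = solve(right)
--     best = max(max(b1, b2), s1 + p2)
--     pre = p1 if p1 < len(left) else len(left) + p2
--     suf = s2 if s2 < len(right) else len(right) + s1
--     return (best, pre, suf)
--
--   max_consecutive = solve(row)[0] if row else 0
--   payout = {3: 1, 4: 2, 5: 6}.get(max_consecutive, 0)
--   return payout, max_consecutive
-- ===== Notes on version B (the rewrite author's own statement) =====
-- stated objective: alternative
-- what changed: Replaces A's single left-to-right running-counter/running-max pass by a divide-and-conquer algorithm: recursively split the row into halves and merge (best run, prefix run, suffix run) triples, the best run across the split being suffix(left)+prefix(right).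
import Mathlib
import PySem

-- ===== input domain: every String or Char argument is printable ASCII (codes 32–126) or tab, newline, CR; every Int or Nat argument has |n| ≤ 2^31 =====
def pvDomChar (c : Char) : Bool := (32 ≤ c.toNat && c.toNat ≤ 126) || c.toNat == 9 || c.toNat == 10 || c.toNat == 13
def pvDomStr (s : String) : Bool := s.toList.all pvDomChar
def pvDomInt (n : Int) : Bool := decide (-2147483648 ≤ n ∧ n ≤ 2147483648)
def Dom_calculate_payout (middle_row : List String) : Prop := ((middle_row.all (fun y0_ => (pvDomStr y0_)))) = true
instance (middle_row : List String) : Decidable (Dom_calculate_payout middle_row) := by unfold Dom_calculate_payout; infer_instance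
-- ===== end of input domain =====

-- B replaces A's left-to-right running-counter pass by a divide-and-conquer merge of
-- (best run, prefix run, suffix run) triples over halves; alternative algorithm, same result.


-- ===== PORT A =====
-- A's for-loop over the state (max_consecutive, current_consecutive)
def pvLoopA : List String → Int → Int → Int
  | [], maxc, _ => maxc
  | s :: xs, maxc, cur =>
    if s == "$" then pvLoopA xs (max maxc (cur + 1)) (cur + 1)
    else pvLoopA xs maxc 0

def calculate_payout (middle_row : List String) : Int × Int :=
  let max_consecutive := pvLoopA middle_row 0 0
  let payout_table : PySem.Dict Int Int := PySem.Dict.ofList [(3, 1), (4, 2), (5, 6)]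
  let payout := payout_table.getD max_consecutive 0
  (payout, max_consecutive)

-- ===== PORT B =====
-- B's recursive solve(seg): (best $ run, leading $ run, trailing $ run) of a segment.
-- The Nat fuel (set to the list length at the call site) only makes the halving
-- recursion structural; the fuel-exhausted and empty-segment branches are unreachable.
def pvSolve : Nat → List String → Int × Int × Int
  | _, [] => (0, 0, 0)
  | _, [a] => let d : Int := if a == "$" then 1 else 0; (d, d, d)
  | 0, _ :: _ :: _ => (0, 0, 0)
  | fuel + 1, x :: y :: rest =>
    let seg := x :: y :: rest
    let mid := seg.length / 2
    let left := seg.take mid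
    let right := seg.drop mid
    let l := pvSolve fuel left
    let r := pvSolve fuel right
    let best := max (max l.1 r.1) (l.2.2 + r.2.1)
    let pre := if l.2.1 < (left.length : Int) then l.2.1 else (left.length : Int) + r.2.1
    let suf := if r.2.2 < (right.length : Int) then r.2.2 else (right.length : Int) + l.2.2
    (best, pre, suf)

def calculate_payout_alt (middle_row : List String) : Int × Int :=
  let max_consecutive := if middle_row = [] then 0 else (pvSolve middle_row.length middle_row).1
  let payout := (PySem.Dict.ofList [(3, 1), (4, 2), (5, 6)] : PySem.Dict Int Int).getD max_consecutive 0
  (payout, max_consecutive)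

-- ===== PRECONDITION & SPEC =====
def Spec_calculate_payout (middle_row : List String) (out : Int × Int) : Prop := out = calculate_payout_alt middle_row
instance (middle_row : List String) (out : Int × Int) : Decidable (Spec_calculate_payout middle_row out) := by unfold Spec_calculate_payout; infer_instance

-- ===== CLAIM (what is proved, stated in full; the proofs are below) =====
def Claim_equal_calculate_payout : Prop := ∀ (middle_row : List String), Dom_calculate_payout middle_row → Spec_calculate_payout middle_row (calculate_payout middle_row)

-- ===== LEMMAS AND PROOFS =====

-- reference quantities: leading $ run, trailing $ run, best $ run
def pvP : List String → Int
  | [] => 0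
  | x :: xs => if x = "$" then pvP xs + 1 else 0
def pvS : List String → Int
  | [] => 0
  | x :: xs => if x = "$" ∧ pvS xs = (xs.length : Int) then (xs.length : Int) + 1 else pvS xs
def pvB : List String → Int
  | [] => 0
  | x :: xs => if x = "$" then max (pvB xs) (pvP xs + 1) else pvB xs

theorem pvP_nonneg (xs : List String) : 0 ≤ pvP xs := by
  induction xs with
  | nil => simp [pvP]
  | cons x t ih => simp only [pvP]; split_ifs <;> omega

theorem pvP_le_len (xs : List String) : pvP xs ≤ (xs.length : Int) := by
  induction xs with
  | nil => simp [pvP]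
  | cons x t ih => simp only [pvP, List.length_cons]; split_ifs <;> push_cast <;> omega

theorem pvS_le_len (xs : List String) : pvS xs ≤ (xs.length : Int) := by
  induction xs with
  | nil => simp [pvS]
  | cons x t ih => simp only [pvS, List.length_cons]; split_ifs <;> push_cast <;> omega

theorem pvS_nonneg (xs : List String) : 0 ≤ pvS xs := by
  induction xs with
  | nil => simp [pvS]
  | cons x t ih =>
    have h := pvS_le_len t
    simp only [pvS]; split_ifs <;> omega

theorem pvB_nonneg (xs : List String) : 0 ≤ pvB xs := by
  induction xs with
  | nil => simp [pvB]
  | cons x t ih => simp only [pvB]; split_ifs <;> omega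

theorem pvP_le_B (xs : List String) : pvP xs ≤ pvB xs := by
  induction xs with
  | nil => simp [pvP, pvB]
  | cons x t ih =>
    have h := pvB_nonneg t
    simp only [pvP, pvB]; split_ifs <;> omega

theorem pvP_eq_len_iff (xs : List String) : pvP xs = (xs.length : Int) ↔ ∀ a ∈ xs, a = "$" := by
  induction xs with
  | nil => simp [pvP]
  | cons x t ih =>
    have h1 := pvP_le_len t
    have h2 : (0:Int) ≤ (t.length : Int) := by positivity
    simp only [pvP, List.length_cons, List.mem_cons, forall_eq_or_imp]
    constructor
    · intro h
      by_cases hx : x = "$"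
      · simp only [hx, if_true] at h
        exact ⟨hx, ih.mp (by push_cast at h ⊢; omega)⟩
      · simp only [hx, if_false] at h; push_cast at h; omega
    · rintro ⟨hx, hall⟩
      simp only [hx, if_true, ih.mpr hall]; push_cast; ring

theorem pvS_eq_len_iff (xs : List String) : pvS xs = (xs.length : Int) ↔ ∀ a ∈ xs, a = "$" := by
  induction xs with
  | nil => simp [pvS]
  | cons x t ih =>
    have h1 := pvS_le_len t
    simp only [pvS, List.length_cons, List.mem_cons, forall_eq_or_imp]
    constructor
    · intro h
      split_ifs at h with hc
      · exact ⟨hc.1, ih.mp hc.2⟩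
      · push_cast at h; omega
    · rintro ⟨hx, hall⟩
      simp only [hx, ih.mpr hall, and_self, if_true]; push_cast; ring

theorem pvS_eq_len_iff_P (xs : List String) : pvS xs = (xs.length : Int) ↔ pvP xs = (xs.length : Int) := by
  rw [pvS_eq_len_iff, pvP_eq_len_iff]

theorem pvP_append (xs ys : List String) :
    pvP (xs ++ ys) = if pvP xs = (xs.length : Int) then (xs.length : Int) + pvP ys else pvP xs := by
  induction xs with
  | nil => simp [pvP]
  | cons x t ih =>
    have h1 := pvP_le_len t
    have h2 : (0:Int) ≤ (t.length : Int) := by positivity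
    simp only [List.cons_append, pvP, List.length_cons, ih]
    split_ifs <;> push_cast at * <;> omega

theorem pvS_append (xs ys : List String) :
    pvS (xs ++ ys) = if pvS ys = (ys.length : Int) then (ys.length : Int) + pvS xs else pvS ys := by
  induction xs with
  | nil => simp only [List.nil_append, pvS]; split_ifs <;> omega
  | cons x t ih =>
    have h1 := pvS_le_len t
    have h2 := pvS_le_len ys
    have h3 := pvS_nonneg t
    have h4 := pvS_nonneg ys
    simp only [List.cons_append, pvS, ih, List.length_append]
    push_cast
    by_cases hx : x = "$" <;>
      simp only [hx, true_and, false_and, if_false] <;> split_ifs <;> omega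

theorem pvB_append (xs ys : List String) :
    pvB (xs ++ ys) = max (max (pvB xs) (pvB ys)) (pvS xs + pvP ys) := by
  induction xs with
  | nil =>
    have h1 := pvB_nonneg ys
    have h2 := pvP_le_B ys
    simp only [List.nil_append, pvB, pvS]; omega
  | cons x t ih =>
    have h1 := pvP_le_len t
    have h2 := pvS_le_len t
    have h3 := pvP_nonneg ys
    have h4 := pvP_nonneg t
    have h5 := pvS_nonneg t
    have h6 := pvB_nonneg t
    have h7 := pvP_le_B t
    have hiff := pvS_eq_len_iff_P t
    simp only [List.cons_append, pvB, pvS, pvP, ih, pvP_append]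
    by_cases hx : x = "$" <;>
      simp only [hx, true_and, false_and, if_false] <;> split_ifs <;> omega

-- A's loop characterized by pvB / pvP
theorem pvLoopA_char (xs : List String) : ∀ (m c : Int), 0 ≤ c → c ≤ m →
    pvLoopA xs m c = max m (max (pvB xs) (c + pvP xs)) := by
  induction xs with
  | nil => intro m c h0 hcm; simp only [pvLoopA, pvB, pvP]; omega
  | cons x t ih =>
    intro m c h0 hcm
    have hP := pvP_nonneg t
    have hPB := pvP_le_B t
    by_cases hx : x = "$"
    · simp only [pvLoopA, pvB, pvP, hx, beq_self_eq_true, if_true]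
      rw [ih (max m (c+1)) (c+1) (by omega) (le_max_right _ _)]
      omega
    · have hx' : (x == "$") = false := by simpa using hx
      simp only [pvLoopA, pvB, pvP, hx', Bool.false_eq_true, if_false, hx]
      rw [ih m 0 le_rfl (by omega)]
      omega

theorem pvLoopA_eq_B (xs : List String) : pvLoopA xs 0 0 = pvB xs := by
  have h1 := pvB_nonneg xs
  have h2 := pvP_le_B xs
  have h3 := pvP_nonneg xs
  rw [pvLoopA_char xs 0 0 le_rfl le_rfl]; omega


-- B's solve computes (pvB, pvP, pvS) on nonempty segments (given enough fuel)
theorem pvSolve_correct : ∀ (f : Nat) (seg : List String), seg ≠ [] → seg.length ≤ f + 1 →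
    pvSolve f seg = (pvB seg, pvP seg, pvS seg) := by
  intro f
  induction f with
  | zero =>
    intro seg hne hlen
    match seg, hne with
    | [a], _ =>
      by_cases ha : a = "$" <;>
        simp [pvSolve, pvB, pvP, pvS, ha]
    | x :: y :: r, _ => simp at hlen
  | succ f ih =>
    intro seg hne hlen
    match seg, hne with
    | [a], _ =>
      by_cases ha : a = "$" <;>
        simp [pvSolve, pvB, pvP, pvS, ha]
    | x :: y :: r, _ =>
      have hlen2 : 2 ≤ (x :: y :: r).length := by simp
      set seg := x :: y :: r with hseg
      set mid := seg.length / 2 with hmid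
      have hmid1 : 1 ≤ mid := by
        have : 2 ≤ seg.length := hlen2
        omega
      have hmidlt : mid < seg.length := by omega
      have hLne : seg.take mid ≠ [] := by
        intro h
        have := congrArg List.length h
        simp [List.length_take] at this
        omega
      have hRne : seg.drop mid ≠ [] := by
        intro h
        have := congrArg List.length h
        simp [List.length_drop] at this
        omega
      have hLlen : (seg.take mid).length ≤ f + 1 := by
        simp [List.length_take]
        omega
      have hRlen : (seg.drop mid).length ≤ f + 1 := by
        simp only [List.length_drop]
        simp only [hseg, List.length_cons] at hlen ⊢
        omega
      have hL := ih (seg.take mid) hLne hLlen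
      have hR := ih (seg.drop mid) hRne hRlen
      have hsplit : seg.take mid ++ seg.drop mid = seg := List.take_append_drop _ _
      have hPL := pvP_le_len (seg.take mid)
      have hSR := pvS_le_len (seg.drop mid)
      have hBapp := pvB_append (seg.take mid) (seg.drop mid)
      have hPapp := pvP_append (seg.take mid) (seg.drop mid)
      have hSapp := pvS_append (seg.take mid) (seg.drop mid)
      rw [hsplit] at hBapp hPapp hSapp
      show pvSolve (f+1) (x :: y :: r) = _
      rw [pvSolve]
      simp only [← hseg, ← hmid, hL, hR, hBapp, hPapp, hSapp]
      refine Prod.ext ?_ (Prod.ext ?_ ?_)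
      · simp
      · simp only
        split_ifs <;> omega
      · simp only
        split_ifs <;> omega

-- ===== VERDICT (by name: the statement is the Claim_ definition above) =====
theorem calculate_payout_spec : Claim_equal_calculate_payout := by
  intro middle_row _
  unfold Spec_calculate_payout calculate_payout calculate_payout_alt
  have hmax : pvLoopA middle_row 0 0 =
      (if middle_row = [] then 0 else (pvSolve middle_row.length middle_row).1) := by
    rw [pvLoopA_eq_B]
    by_cases h : middle_row = []
    · simp [h, pvB]
    · rw [if_neg h, pvSolve_correct middle_row.length middle_row h (by omega)]
  simp [hmax]
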